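-- pv_equiv track=rewrite | github.com/GeorgeBeshay/ProblemSolving | CF_Phase_2_1/Greedy/P465B_Inbox(100500).py | TheAmazingFunction
-- ===== SOURCE A (Python) =====
-- def TheAmazingFunction(myList: list):
--     Number_Of_Operations = 0
--     Current_Position = -1 # Out Of The List
--     for i in range(len(myList)):
--         if myList[i] == 1:
--             if Current_Position == -1:
--                 Number_Of_Operations += 1
--                 Current_Position = i
--
--             else:
--                 if i - Current_Position > 1:
--                     Number_Of_Operations += 2
--                     Current_Position = i
--                 else:
--                     Number_Of_Operations += 1
--                     Current_Position = i
--     return Number_Of_Operations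
-- ===== SOURCE B (Python) =====
-- def TheAmazingFunction(myList: list):
--     ones = myList.count(1)
--     if ones == 0:
--         return 0
--     adjacent = sum(1 for a, b in zip(myList, myList[1:]) if a == 1 and b == 1)
--     return 2 * ones - adjacent - 1
-- ===== Notes on version B (the rewrite author's own statement) =====
-- stated objective: simpler
-- what changed: Replaces A's position/gap state machine with two independent aggregate counts - myList.count(1) and the number of adjacent 1-1 pairs over zip(myList, myList[1:]) - combined by the closed form 2*ones - adjacent - 1 (0 when there are no ones).
import Mathlib
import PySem

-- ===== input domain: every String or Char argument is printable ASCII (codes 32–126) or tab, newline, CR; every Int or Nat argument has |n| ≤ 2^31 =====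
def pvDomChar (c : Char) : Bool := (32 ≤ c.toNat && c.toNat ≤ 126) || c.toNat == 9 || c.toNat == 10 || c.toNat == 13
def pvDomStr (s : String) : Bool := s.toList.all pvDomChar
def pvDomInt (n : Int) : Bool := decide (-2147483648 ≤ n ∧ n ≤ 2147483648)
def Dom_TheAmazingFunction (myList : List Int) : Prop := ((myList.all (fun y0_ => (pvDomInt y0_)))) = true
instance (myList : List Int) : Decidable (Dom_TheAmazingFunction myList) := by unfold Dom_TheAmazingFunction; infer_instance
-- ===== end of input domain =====

-- B replaces A's position/gap state machine by two library aggregates — the count of 1s and the count of adjacent 1-1 pairs over zip(l, l[1:]) — combined in the closed form 2*ones - adjacent - 1; objective: simpler.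


-- ===== PORT A =====
-- for i in range(len(myList)): indexed loop ported as a fold over the (value, index) pairs;
-- state = (Number_Of_Operations, Current_Position), Current_Position starts at -1.
def pvStepA (st : Int × Int) (p : Int × Nat) : Int × Int :=
  if p.1 = 1 then
    if st.2 = -1 then (st.1 + 1, (p.2 : Int))
    else
      if (p.2 : Int) - st.2 > 1 then (st.1 + 2, (p.2 : Int))
      else (st.1 + 1, (p.2 : Int))
  else st

def TheAmazingFunction (myList : List Int) : Int :=
  (myList.zipIdx.foldl pvStepA (0, -1)).1

-- ===== PORT B =====
-- ones = myList.count(1); if ones == 0 return 0;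
-- adjacent = sum(1 for a, b in zip(myList, myList[1:]) if a == 1 and b == 1); return 2*ones - adjacent - 1.
def TheAmazingFunction_alt (myList : List Int) : Int :=
  let ones : Int := (PySem.List.count myList 1 : Int)
  if ones = 0 then 0
  else
    let adjacent : Int :=
      (myList.zip (PySem.List.slice myList (some 1) none)).foldl
        (fun acc p => if p.1 = 1 ∧ p.2 = 1 then acc + 1 else acc) 0
    2 * ones - adjacent - 1

-- ===== PRECONDITION & SPEC =====
def Spec_TheAmazingFunction (myList : List Int) (out : Int) : Prop := out = TheAmazingFunction_alt myList
instance (myList : List Int) (out : Int) : Decidable (Spec_TheAmazingFunction myList out) := by unfold Spec_TheAmazingFunction; infer_instance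

-- ===== CLAIM (what is proved, stated in full; the proofs are below) =====
def Claim_equal_TheAmazingFunction : Prop := ∀ (myList : List Int), Dom_TheAmazingFunction myList → Spec_TheAmazingFunction myList (TheAmazingFunction myList)

-- ===== LEMMAS AND PROOFS =====

-- proof-only intermediate state machine: (ones so far, runs so far, previous element was 1)
def pvStepM (st : Int × Int × Bool) (x : Int) : Int × Int × Bool :=
  if x = 1 then (st.1 + 1, (if st.2.2 then st.2.1 else st.2.1 + 1), true)
  else (st.1, st.2.1, false)

-- number of adjacent 1-1 pairs in l, counting a boundary pair when prev (= "element before l was 1")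
def pvAdj (prev : Bool) : List Int → Int
  | [] => 0
  | x :: xs => (if prev = true ∧ x = 1 then 1 else 0) + pvAdj (decide (x = 1)) xs

-- "last element of l is 1" (prev if l is empty)
def pvLast (prev : Bool) : List Int → Bool
  | [] => prev
  | x :: xs => pvLast (decide (x = 1)) xs

-- Invariant linking A's (ops, last-1-position) state to the intermediate (ones, runs, prev) state
-- while traversing the same suffix l, whose first element has index n.
theorem pv_invariant (l : List Int) (n : Nat) (ops pos ones runs : Int) (prev : Bool)
    (hops : ops = ones + max (runs - 1) 0)
    (hst : (pos = -1 ∧ runs = 0 ∧ prev = false) ∨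
           (1 ≤ runs ∧ 0 ≤ pos ∧ pos < (n : Int) ∧ (prev = true ↔ pos = (n : Int) - 1))) :
    ((l.zipIdx n).foldl pvStepA (ops, pos)).1 =
      (let s := l.foldl pvStepM (ones, runs, prev); s.1 + max (s.2.1 - 1) 0) := by
  induction l generalizing n ops pos ones runs prev with
  | nil => simpa using hops
  | cons x xs ih =>
    simp only [List.zipIdx_cons, List.foldl_cons]
    by_cases hx : x = 1
    · rcases hst with ⟨h1, h2, h3⟩ | ⟨h1, h2, h3, h4⟩
      · subst h1 h2 h3
        simp only [pvStepA, pvStepM, hx, if_true, Bool.false_eq_true, if_false]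
        apply ih (n := n + 1)
        · simp [hops]
        · refine Or.inr ⟨by omega, by omega, by push_cast; omega, ?_⟩
          simp only [true_iff]; push_cast; ring
      · have hne : pos ≠ -1 := by omega
        simp only [pvStepA, pvStepM, hx, if_true, if_neg hne]
        by_cases hp : prev = true
        · have hpos : pos = (n : Int) - 1 := h4.mp hp
          rw [if_neg (by omega : ¬ ((n : Int) - pos > 1))]
          simp only [hp, if_true]
          apply ih (n := n + 1)
          · simp [hops]; ring
          · refine Or.inr ⟨by omega, by omega, by push_cast; omega, ?_⟩
            simp only [true_iff]; push_cast; ring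
        · have hpf : prev = false := by cases prev <;> simp_all
          have hpos : pos ≠ (n : Int) - 1 := fun h => hp (h4.mpr h)
          rw [if_pos (by omega : (n : Int) - pos > 1)]
          simp only [hpf, Bool.false_eq_true, if_false]
          apply ih (n := n + 1)
          · simp [hops]; omega
          · refine Or.inr ⟨by omega, by omega, by push_cast; omega, ?_⟩
            simp only [true_iff]; push_cast; ring
    · simp only [pvStepA, pvStepM, if_neg hx]
      apply ih (n := n + 1)
      · exact hops
      · rcases hst with ⟨h1, h2, h3⟩ | ⟨h1, h2, h3, h4⟩
        · subst h1 h2 h3; exact Or.inl ⟨rfl, rfl, rfl⟩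
        · refine Or.inr ⟨h1, h2, by push_cast; omega, ?_⟩
          simp only [Bool.false_eq_true, false_iff]
          push_cast; omega

-- the intermediate fold in closed form: count of 1s and pvAdj
theorem pv_fold_closed (l : List Int) : ∀ (ones runs : Int) (prev : Bool),
    l.foldl pvStepM (ones, runs, prev) =
      (ones + (l.count 1 : Int), runs + (l.count 1 : Int) - pvAdj prev l, pvLast prev l) := by
  induction l with
  | nil => intro ones runs prev; simp [pvAdj, pvLast]
  | cons x xs ih =>
    intro ones runs prev
    by_cases hx : x = 1
    · subst hx
      cases prev <;>
        simp [pvStepM, pvAdj, pvLast, ih] <;>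
        refine ⟨by ring, by ring⟩
    · simp [pvStepM, pvAdj, pvLast, hx, ih]

-- bounds: 0 ≤ pvAdj ≤ count, and with no preceding 1 a nonzero count forces pvAdj ≤ count - 1
theorem pv_adj_bounds (l : List Int) : ∀ (prev : Bool),
    0 ≤ pvAdj prev l ∧ pvAdj prev l ≤ (l.count 1 : Int) ∧
      (prev = false → l.count 1 ≠ 0 → pvAdj prev l ≤ (l.count 1 : Int) - 1) := by
  induction l with
  | nil => intro prev; simp [pvAdj]
  | cons x xs ih =>
    intro prev
    by_cases hx : x = 1
    · subst hx
      obtain ⟨a1, a2, -⟩ := ih true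
      have hcN : ((1 : Int) :: xs).count 1 = xs.count 1 + 1 := by simp
      have hrw2 : pvAdj prev ((1 : Int) :: xs) = (if prev = true then 1 else 0) + pvAdj true xs := by
        cases prev <;> simp [pvAdj]
      rw [hrw2, hcN]
      refine ⟨by cases prev <;> simp <;> omega, by cases prev <;> simp <;> omega,
        fun hp _ => by subst hp; simp; omega⟩
    · obtain ⟨a1, a2, a3⟩ := ih false
      have hrw2 : pvAdj prev (x :: xs) = pvAdj false xs := by simp [pvAdj, hx]
      have hcN : (x :: xs).count 1 = xs.count 1 := by simp [hx]
      rw [hrw2, hcN]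
      exact ⟨a1, a2, fun _ h => a3 rfl h⟩

-- B's zip fold computes pvAdj of the tail (boundary flag = "head is 1")
theorem pv_zip_adj (xs : List Int) : ∀ (x : Int) (acc : Int),
    ((x :: xs).zip xs).foldl
        (fun acc p => if p.1 = 1 ∧ p.2 = 1 then acc + 1 else acc) acc =
      acc + pvAdj (decide (x = 1)) xs := by
  induction xs with
  | nil => intro x acc; simp [pvAdj]
  | cons y ys ih =>
    intro x acc
    simp only [List.zip_cons_cons, List.foldl_cons, pvAdj]
    rw [ih y]
    by_cases hx : x = 1 <;> by_cases hy : y = 1 <;> simp [hx, hy] <;> ring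

-- ===== VERDICT (by name: the statement is the Claim_ definition above) =====
theorem TheAmazingFunction_spec : Claim_equal_TheAmazingFunction := by
  intro myList _
  unfold Spec_TheAmazingFunction
  have hA : TheAmazingFunction myList =
      (myList.count 1 : Int) + max ((myList.count 1 : Int) - pvAdj false myList - 1) 0 := by
    unfold TheAmazingFunction
    rw [pv_invariant myList 0 0 (-1) 0 0 false (by simp) (Or.inl ⟨rfl, rfl, rfl⟩)]
    simp [pv_fold_closed]
  rw [hA]
  simp only [TheAmazingFunction_alt, PySem.List.count_eq, PySem.List.slice_from_one]
  obtain ⟨b1, b2, b3⟩ := pv_adj_bounds myList false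
  cases myList with
  | nil => simp [pvAdj]
  | cons x xs =>
    simp only [List.tail_cons]
    rw [pv_zip_adj xs x 0]
    have hadj : pvAdj false (x :: xs) = pvAdj (decide (x = 1)) xs := by simp [pvAdj]
    rw [← hadj]
    split_ifs with h
    · have hz : (x :: xs).count 1 = 0 := by exact_mod_cast h
      omega
    · have hcne : (x :: xs).count 1 ≠ 0 := by exact_mod_cast h
      have hb := b3 rfl hcne
      omega
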